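-- pv_equiv track=rewrite | github.com/acsvalentinacs/HOPE-Minibot | ai_gateway/config.py | is_domain_allowed
-- ===== SOURCE A (Python) =====
-- from typing import Final
--
-- ALLOWED_DOMAINS: Final[frozenset[str]] = frozenset({
--     # === AI APIs (КРИТИЧНО) ===
--     "api.anthropic.com",          # Claude API для Sentiment, Doctor
--
--     # === BINANCE (Market Data) ===
--     "api.binance.com",            # REST API для Regime, Anomaly
--     "stream.binance.com",         # WebSocket real-time data
--     "testnet.binance.vision",     # Testnet trading
--     "data.binance.vision",        # Historical data archives
--
--     # === RSS FEEDS (News) ===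
--     # Validated 2026-01-29: 4/4 working
--     "www.coindesk.com",
--     "coindesk.com",
--     "cointelegraph.com",
--     "www.theblock.co",
--     "theblock.co",
--     "decrypt.co",
--     # REMOVED: bitcoinmagazine.com - HTTP 403 Forbidden
--
--     # === CRYPTO DATA ===
--     "api.coingecko.com",
--
--     # === INFRASTRUCTURE ===
--     "pypi.org",
--     "files.pythonhosted.org",
--     "github.com",
--     "api.github.com",
--     "raw.githubusercontent.com",
--     "checkip.amazonaws.com",
--
--     # === SENTIMENT ===
--     "api.alternative.me",         # Fear & Greed Index
-- })
--
-- def is_domain_allowed(domain: str) -> bool: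
--     """
--     Check if domain is in whitelist.
--
--     FAIL-CLOSED: Unknown domain = rejected.
--     """
--     domain = domain.lower().strip()
--
--     # Exact match
--     if domain in ALLOWED_DOMAINS:
--         return True
--
--     # Subdomain match (e.g., api.binance.com for binance.com)
--     for allowed in ALLOWED_DOMAINS:
--         if domain.endswith("." + allowed):
--             return True
--
--     return False
-- ===== SOURCE B (Python) =====
-- ALLOWED_DOMAINS = frozenset({
--     "api.anthropic.com",
--     "api.binance.com",
--     "stream.binance.com",
--     "testnet.binance.vision",
--     "data.binance.vision",
--     "www.coindesk.com",
--     "coindesk.com",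
--     "cointelegraph.com",
--     "www.theblock.co",
--     "theblock.co",
--     "decrypt.co",
--     "api.coingecko.com",
--     "pypi.org",
--     "files.pythonhosted.org",
--     "github.com",
--     "api.github.com",
--     "raw.githubusercontent.com",
--     "checkip.amazonaws.com",
--     "api.alternative.me",
-- })
--
--
-- def is_domain_allowed(domain: str) -> bool:
--     """Whitelist check: exact match, or the suffix after any '.' is allowed."""
--     d = domain.lower().strip()
--     if d in ALLOWED_DOMAINS:
--         return True
--     for i, ch in enumerate(d):
--         if ch == '.' and d[i + 1:] in ALLOWED_DOMAINS:
--             return True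
--     return False
-- ===== Notes on version B (the rewrite author's own statement) =====
-- stated objective: alternative
-- what changed: B makes a single pass over the input, testing the suffix after each dot for set membership, instead of A's scan of the entire allowed set with an endswith test per entry.
import Mathlib
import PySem

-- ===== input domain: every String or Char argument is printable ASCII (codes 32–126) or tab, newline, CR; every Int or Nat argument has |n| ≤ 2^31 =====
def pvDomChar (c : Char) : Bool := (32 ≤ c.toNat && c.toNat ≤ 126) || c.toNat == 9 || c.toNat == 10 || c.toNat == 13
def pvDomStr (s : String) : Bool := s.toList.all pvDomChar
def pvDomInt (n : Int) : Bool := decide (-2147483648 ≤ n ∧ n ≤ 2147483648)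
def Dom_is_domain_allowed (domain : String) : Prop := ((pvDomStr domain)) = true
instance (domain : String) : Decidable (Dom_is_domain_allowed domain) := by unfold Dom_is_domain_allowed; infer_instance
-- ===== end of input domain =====

-- B replaces A's scan of the allowed set with a single pass over the input's
-- dot positions, set-testing each suffix (objective: alternative, same cost class).

-- ===== PORT A =====
-- the ALLOWED_DOMAINS frozenset (the loop only asks existence, so iteration order is immaterial)
def pvAllowed : List String :=
  ["api.anthropic.com", "api.binance.com", "stream.binance.com",
   "testnet.binance.vision", "data.binance.vision", "www.coindesk.com",
   "coindesk.com", "cointelegraph.com", "www.theblock.co", "theblock.co",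
   "decrypt.co", "api.coingecko.com", "pypi.org", "files.pythonhosted.org",
   "github.com", "api.github.com", "raw.githubusercontent.com",
   "checkip.amazonaws.com", "api.alternative.me"]

def is_domain_allowed (domain : String) : Bool :=
  let d := PySem.Str.strip (PySem.Str.lower domain)
  if pvAllowed.contains d then true
  else pvAllowed.any (fun allowed => PySem.Str.endswith d ("." ++ allowed))

-- ===== PORT B =====
-- the 'for i, ch in enumerate(d)' loop of Source B: at each char, if it is '.',
-- test the remaining suffix d[i+1:] for membership
def pvSuffixLoop : List Char → Bool
  | [] => false
  | c :: rest =>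
      if c == '.' && pvAllowed.contains (String.ofList rest) then true
      else pvSuffixLoop rest

def is_domain_allowed_alt (domain : String) : Bool :=
  let d := PySem.Str.strip (PySem.Str.lower domain)
  if pvAllowed.contains d then true
  else pvSuffixLoop d.toList

-- ===== PRECONDITION & SPEC =====
def Spec_is_domain_allowed (domain : String) (out : Bool) : Prop := out = is_domain_allowed_alt domain
instance (domain : String) (out : Bool) : Decidable (Spec_is_domain_allowed domain out) := by unfold Spec_is_domain_allowed; infer_instance

-- ===== CLAIM (what is proved, stated in full; the proofs are below) =====
def Claim_equal_is_domain_allowed : Prop := ∀ (domain : String), Dom_is_domain_allowed domain → Spec_is_domain_allowed domain (is_domain_allowed domain)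

-- ===== LEMMAS AND PROOFS =====

-- B's suffix loop finds exactly the strings of pvAllowed that, preceded by '.', are a suffix of cs
theorem pvSuffixLoop_iff (cs : List Char) :
    pvSuffixLoop cs = true ↔ ∃ a ∈ pvAllowed, ('.' :: a.toList) <:+ cs := by
  induction cs with
  | nil => simp [pvSuffixLoop]
  | cons c rest ih =>
      have hstep : pvSuffixLoop (c :: rest)
          = ((c == '.' && pvAllowed.contains (String.ofList rest)) || pvSuffixLoop rest) := by
        simp only [pvSuffixLoop]
        cases (c == '.' && pvAllowed.contains (String.ofList rest)) <;> simp
      rw [hstep, Bool.or_eq_true, Bool.and_eq_true, ih]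
      constructor
      · rintro (⟨hc, hm⟩ | ⟨a, ha, hs⟩)
        · refine ⟨String.ofList rest, List.contains_iff_mem.mp hm, ?_⟩
          have hc' : c = '.' := beq_iff_eq.mp hc
          subst hc'
          simp
        · exact ⟨a, ha, hs.trans (List.suffix_cons c rest)⟩
      · rintro ⟨a, ha, hs⟩
        rcases List.suffix_cons_iff.mp hs with heq | hs'
        · obtain ⟨hc, hr⟩ := List.cons.inj heq
          left
          refine ⟨beq_iff_eq.mpr hc.symm, List.contains_iff_mem.mpr ?_⟩
          have hb : String.ofList rest = a := by rw [← hr]; exact String.ofList_toList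
          exact hb ▸ ha
        · exact Or.inr ⟨a, ha, hs'⟩

-- A's endswith scan over pvAllowed finds exactly the same strings
theorem pvEndswithAny_iff (d : String) :
    (pvAllowed.any (fun a => PySem.Str.endswith d ("." ++ a))) = true ↔
      ∃ a ∈ pvAllowed, ('.' :: a.toList) <:+ d.toList := by
  rw [List.any_eq_true]
  refine exists_congr fun a => and_congr_right fun _ => ?_
  rw [PySem.Str.endswith_eq, PySem.Chars.endswith_iff]
  have : ("." ++ a).toList = '.' :: a.toList := by
    simp
  rw [this]

-- ===== VERDICT (by name: the statement is the Claim_ definition above) =====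
theorem is_domain_allowed_spec : Claim_equal_is_domain_allowed := by
  intro domain _
  have hmain : ∀ d : String,
      (pvAllowed.any (fun allowed => PySem.Str.endswith d ("." ++ allowed))) = pvSuffixLoop d.toList := by
    intro d
    rw [Bool.eq_iff_iff, pvEndswithAny_iff, pvSuffixLoop_iff]
  unfold Spec_is_domain_allowed
  simp only [is_domain_allowed, is_domain_allowed_alt, hmain]
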